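-- pv_equiv track=rewrite | github.com/s7eamy/k674-gyvunu-prieglaudos-sistema | backend/app/controllers/donation_controller.py | _build_donor_level
-- ===== SOURCE A (Python) =====
-- DONOR_LEVEL_THRESHOLDS = [0, 100, 250, 500, 1000]
--
-- def _build_donor_level(total_points):
--     max_level = len(DONOR_LEVEL_THRESHOLDS)
--     level = 1
--
--     for index in range(len(DONOR_LEVEL_THRESHOLDS) - 1, -1, -1):
--         if total_points >= DONOR_LEVEL_THRESHOLDS[index]:
--             level = index + 1
--             break
--
--     if level >= max_level:
--         return {
--             'level': max_level,
--             'max_level': max_level,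
--             'total_points': total_points,
--             'points_to_next_level': 0,
--             'next_threshold': None,
--         }
--
--     next_threshold = DONOR_LEVEL_THRESHOLDS[level]
--     return {
--         'level': level,
--         'max_level': max_level,
--         'total_points': total_points,
--         'points_to_next_level': max(0, next_threshold - total_points),
--         'next_threshold': next_threshold,
--     }
-- ===== SOURCE B (Python) =====
-- DONOR_LEVEL_THRESHOLDS = [0, 100, 250, 500, 1000]
--
-- def _build_donor_level(total_points):
--     thresholds = DONOR_LEVEL_THRESHOLDS
--     # level = number of thresholds reached (forward count), floored to 1
--     level = max(1, sum(1 for t in thresholds if total_points >= t))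
--     next_threshold = thresholds[level] if level < len(thresholds) else None
--     return {
--         'level': level,
--         'max_level': len(thresholds),
--         'total_points': total_points,
--         'points_to_next_level': 0 if next_threshold is None else max(0, next_threshold - total_points),
--         'next_threshold': next_threshold,
--     }
-- ===== Notes on version B (the rewrite author's own statement) =====
-- stated objective: simpler
-- what changed: A's reverse scan with break and two separate dict-building branches are replaced by a forward count of thresholds reached (floored to 1) and a single branch-free dict assembly keyed on an optional next threshold.
import Mathlib
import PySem

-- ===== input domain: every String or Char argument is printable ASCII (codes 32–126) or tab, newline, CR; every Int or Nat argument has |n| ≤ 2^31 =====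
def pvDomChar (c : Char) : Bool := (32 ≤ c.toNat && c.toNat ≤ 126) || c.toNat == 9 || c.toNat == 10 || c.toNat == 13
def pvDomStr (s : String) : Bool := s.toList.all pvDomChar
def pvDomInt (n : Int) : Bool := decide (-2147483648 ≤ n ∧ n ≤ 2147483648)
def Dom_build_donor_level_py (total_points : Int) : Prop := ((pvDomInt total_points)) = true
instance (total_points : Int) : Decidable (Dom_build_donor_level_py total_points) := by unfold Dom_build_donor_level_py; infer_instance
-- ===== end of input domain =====

-- B replaces A's reverse scan-with-break and twin dict branches by a forward count of
-- thresholds reached and a single dict assembly over an optional next threshold (simpler).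

def pvThresholds : List Int := [0, 100, 250, 500, 1000]

-- ===== PORT A =====
-- the `for index in range(len-1, -1, -1): if …: level = index+1; break` loop
def pvLoopA (total_points : Int) : List Int → Int → Int
  | [], level => level
  | i :: rest, level =>
    if total_points ≥ (PySem.List.pyGet? pvThresholds i).getD 0 then i + 1  -- break
    else pvLoopA total_points rest level

def build_donor_level_py (total_points : Int) : List (String × Option Int) :=
  let max_level : Int := (pvThresholds.length : Int)
  let level : Int := pvLoopA total_points (PySem.List.pyRange (max_level - 1) (-1) (-1)) 1
  if level ≥ max_level then
    [("level", some max_level), ("max_level", some max_level), ("total_points", some total_points),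
     ("points_to_next_level", some 0), ("next_threshold", none)]
  else
    let next_threshold : Int := (PySem.List.pyGet? pvThresholds level).getD 0
    [("level", some level), ("max_level", some max_level), ("total_points", some total_points),
     ("points_to_next_level", some (max 0 (next_threshold - total_points))), ("next_threshold", some next_threshold)]

-- ===== PORT B =====
def build_donor_level_py_alt (total_points : Int) : List (String × Option Int) :=
  -- level = max(1, sum(1 for t in thresholds if total_points >= t))
  let level : Int := max 1 (pvThresholds.foldl (fun acc t => if total_points ≥ t then acc + 1 else acc) 0)
  -- next_threshold = thresholds[level] if level < len(thresholds) else None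
  let next_threshold : Option Int :=
    if level < (pvThresholds.length : Int) then PySem.List.pyGet? pvThresholds level else none
  [("level", some level),
   ("max_level", some (pvThresholds.length : Int)),
   ("total_points", some total_points),
   ("points_to_next_level", some (match next_threshold with
     | none => 0
     | some nt => max 0 (nt - total_points))),
   ("next_threshold", next_threshold)]

-- ===== PRECONDITION & SPEC =====
def Spec_build_donor_level_py (total_points : Int) (out : List (String × Option Int)) : Prop := out = build_donor_level_py_alt total_points
instance (total_points : Int) (out : List (String × Option Int)) : Decidable (Spec_build_donor_level_py total_points out) := by unfold Spec_build_donor_level_py; infer_instance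

-- ===== CLAIM (what is proved, stated in full; the proofs are below) =====
def Claim_equal_build_donor_level_py : Prop := ∀ (total_points : Int), Dom_build_donor_level_py total_points → Spec_build_donor_level_py total_points (build_donor_level_py total_points)

-- ===== LEMMAS AND PROOFS =====
-- the two level computations agree (A's reverse break-scan vs B's floored forward count)
lemma pv_lvl (tp : Int) :
    max 1 (pvThresholds.foldl (fun acc t => if tp ≥ t then acc + 1 else acc) 0)
      = pvLoopA tp [4, 3, 2, 1, 0] 1 := by
  simp only [pvLoopA, pvThresholds, List.foldl]
  norm_num [PySem.List.pyGet?, PySem.List.pyIdx?, pvThresholds,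
    (show Int.toNat 4 = 4 from rfl), (show Int.toNat 3 = 3 from rfl),
    (show Int.toNat 2 = 2 from rfl), (show Int.toNat 1 = 1 from rfl),
    (show Int.toNat 0 = 0 from rfl), List.getElem_cons_succ, List.getElem_cons_zero]
  split_ifs <;> omega

lemma pv_lvl_lb (tp : Int) : 1 ≤ pvLoopA tp [4, 3, 2, 1, 0] 1 := by
  simp only [pvLoopA]
  norm_num [PySem.List.pyGet?, PySem.List.pyIdx?, pvThresholds,
    (show Int.toNat 4 = 4 from rfl), (show Int.toNat 3 = 3 from rfl),
    (show Int.toNat 2 = 2 from rfl), (show Int.toNat 1 = 1 from rfl),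
    (show Int.toNat 0 = 0 from rfl), List.getElem_cons_succ, List.getElem_cons_zero]
  split_ifs <;> omega

lemma pv_lvl_ub (tp : Int) : pvLoopA tp [4, 3, 2, 1, 0] 1 ≤ 5 := by
  simp only [pvLoopA]
  norm_num [PySem.List.pyGet?, PySem.List.pyIdx?, pvThresholds,
    (show Int.toNat 4 = 4 from rfl), (show Int.toNat 3 = 3 from rfl),
    (show Int.toNat 2 = 2 from rfl), (show Int.toNat 1 = 1 from rfl),
    (show Int.toNat 0 = 0 from rfl), List.getElem_cons_succ, List.getElem_cons_zero]
  split_ifs <;> omega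

lemma pv_eval (tp : Int) : build_donor_level_py tp = build_donor_level_py_alt tp := by
  have e : PySem.List.pyRange (((pvThresholds.length : Int)) - 1) (-1) (-1) = [4, 3, 2, 1, 0] := by decide
  simp only [build_donor_level_py, build_donor_level_py_alt, e, pv_lvl]
  have h1 := pv_lvl_lb tp
  have h5 := pv_lvl_ub tp
  set L := pvLoopA tp [4, 3, 2, 1, 0] 1 with hL
  clear_value L
  interval_cases L <;> norm_num [PySem.List.pyGet?, PySem.List.pyIdx?, pvThresholds,
    (show Int.toNat 4 = 4 from rfl), (show Int.toNat 3 = 3 from rfl),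
    (show Int.toNat 2 = 2 from rfl), (show Int.toNat 1 = 1 from rfl),
    (show Int.toNat 0 = 0 from rfl), List.getElem_cons_succ, List.getElem_cons_zero]

-- ===== VERDICT (by name: the statement is the Claim_ definition above) =====
theorem build_donor_level_py_spec : Claim_equal_build_donor_level_py := by
  intro tp _
  exact pv_eval tp
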